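-- pv_equiv track=rewrite | github.com/RussellDash332/pytils | compgeo_2d_minkowski_polygon_sum.py | minkowski
-- ===== SOURCE A (Python) =====
-- def minkowski(P, Q):
--     p = P.index(min(P)); q = Q.index(min(Q)); a = len(P); b = len(Q); R = [(P[p][0]+Q[q][0], P[p][1]+Q[q][1])]; i = p; j = q
--     while i < p+a or j < q+b:
--         if i == p+a: j += 1
--         elif j == q+b: i += 1
--         else:
--             if (c:=(P[(i+1)%a][0]-P[i%a][0])*(Q[(j+1)%b][1]-Q[j%b][1])-(P[(i+1)%a][1]-P[i%a][1])*(Q[(j+1)%b][0]-Q[j%b][0])) >= 0: i += 1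
--             if c <= 0: j += 1
--         R.append((P[i%a][0]+Q[j%b][0], P[i%a][1]+Q[j%b][1]))
--     return R
-- ===== SOURCE B (Python) =====
-- def minkowski(P, Q):
--     def start_and_edges(V):
--         k = V.index(min(V))
--         rot = V[k:] + V[:k]
--         n = len(rot)
--         return rot[0], [(rot[(t + 1) % n][0] - rot[t][0], rot[(t + 1) % n][1] - rot[t][1]) for t in range(n)]
--
--     (sx, sy), EP = start_and_edges(P)
--     (tx, ty), EQ = start_and_edges(Q)
--     # staged pass 2: for each P edge, flush the Q edges turning before it, then
--     # emit the P edge (fused with a parallel Q edge when one is next in line)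
--     steps = []
--     j = 0
--     for (ex, ey) in EP:
--         while j < len(EQ) and ex * EQ[j][1] - ey * EQ[j][0] < 0:
--             steps.append(EQ[j])
--             j += 1
--         if j < len(EQ) and ex * EQ[j][1] - ey * EQ[j][0] == 0:
--             steps.append((ex + EQ[j][0], ey + EQ[j][1]))
--             j += 1
--         else:
--             steps.append((ex, ey))
--     steps += EQ[j:]
--     # staged pass 3: the output polygon is the running sum of the step vectors
--     out = [(sx + tx, sy + ty)]
--     for dx, dy in steps:
--         out.append((out[-1][0] + dx, out[-1][1] + dy))
--     return out
-- ===== Notes on version B (the rewrite author's own statement) =====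
-- stated objective: alternative
-- what changed: A is one fused while-loop over vertex indices with mod wraparound appending vertex sums; B is staged: rotate each polygon to its lexicographic minimum, extract explicit edge-vector lists, then an asymmetric pass that for each P edge first flushes the Q edges turning before it and emits the P edge (fused with a parallel Q edge), and finally emits the polygon as running sums of the step vectors; the per-edge cross-product decisions themselves are forced by A's exact behaviour on arbitrary (non-convex) inputs, so only the decomposition can differ.
import Mathlib
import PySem

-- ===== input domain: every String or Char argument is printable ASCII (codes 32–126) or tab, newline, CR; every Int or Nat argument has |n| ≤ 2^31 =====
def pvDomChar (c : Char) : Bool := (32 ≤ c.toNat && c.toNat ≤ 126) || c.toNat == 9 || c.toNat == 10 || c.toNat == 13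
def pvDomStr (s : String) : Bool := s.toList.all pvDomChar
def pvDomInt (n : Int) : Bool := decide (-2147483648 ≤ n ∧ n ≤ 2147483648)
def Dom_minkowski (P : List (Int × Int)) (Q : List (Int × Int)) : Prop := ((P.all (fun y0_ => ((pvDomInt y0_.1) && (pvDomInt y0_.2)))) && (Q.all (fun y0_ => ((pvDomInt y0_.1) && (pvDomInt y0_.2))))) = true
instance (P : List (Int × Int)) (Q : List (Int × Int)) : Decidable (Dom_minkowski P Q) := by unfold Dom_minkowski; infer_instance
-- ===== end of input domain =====

-- B replaces A's fused mod-indexed loop by staged passes: rotation to the lexicographic minimum, explicit edge-vector lists, an asymmetric fuse that flushes Q's earlier edges before each P edge, and running sums (alternative decomposition, same cost).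


-- ===== PORT A =====
-- helper shared by both ports (both Pythons literally contain `X.index(min(X))`):
-- index of the first lexicographically minimal element (Python min on tuples is lexicographic,
-- and .index returns the first occurrence of that minimum).
def pvLexLt (u v : Int × Int) : Bool := u.1 < v.1 || (u.1 == v.1 && u.2 < v.2)

def pvArgminGo (xs : List (Int × Int)) (best : Int × Int) (bidx k : Nat) : Nat :=
  match xs with
  | [] => bidx
  | v :: t => if pvLexLt v best then pvArgminGo t v k (k + 1) else pvArgminGo t best bidx (k + 1)

def pvArgmin (xs : List (Int × Int)) : Nat :=
  match xs with
  | [] => 0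
  | h :: t => pvArgminGo t h 0 1

-- xs[k]: every use below has k in range on Pre_ inputs, so the default is never observed
def pvGetP (xs : List (Int × Int)) (k : Nat) : Int × Int := xs.getD k (0, 0)

-- A's while loop, step for step; the fuel a+b is exactly the number of iterations Python's
-- loop performs (each iteration increases i+j by at least 1 and i+j advances a+b in total)
def minkLoopA (P Q : List (Int × Int)) (p q a b : Nat) :
    Nat → Nat → Nat → List (Int × Int) → List (Int × Int)
  | 0, _, _, R => R
  | fuel + 1, i, j, R =>
    if i < p + a ∨ j < q + b then
      if i = p + a then
        minkLoopA P Q p q a b fuel i (j + 1)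
          (R ++ [((pvGetP P (i % a)).1 + (pvGetP Q ((j + 1) % b)).1,
                  (pvGetP P (i % a)).2 + (pvGetP Q ((j + 1) % b)).2)])
      else if j = q + b then
        minkLoopA P Q p q a b fuel (i + 1) j
          (R ++ [((pvGetP P ((i + 1) % a)).1 + (pvGetP Q (j % b)).1,
                  (pvGetP P ((i + 1) % a)).2 + (pvGetP Q (j % b)).2)])
      else
        let c : Int :=
          ((pvGetP P ((i + 1) % a)).1 - (pvGetP P (i % a)).1) *
            ((pvGetP Q ((j + 1) % b)).2 - (pvGetP Q (j % b)).2) -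
          ((pvGetP P ((i + 1) % a)).2 - (pvGetP P (i % a)).2) *
            ((pvGetP Q ((j + 1) % b)).1 - (pvGetP Q (j % b)).1)
        let i' := if c ≥ 0 then i + 1 else i
        let j' := if c ≤ 0 then j + 1 else j
        minkLoopA P Q p q a b fuel i' j'
          (R ++ [((pvGetP P (i' % a)).1 + (pvGetP Q (j' % b)).1,
                  (pvGetP P (i' % a)).2 + (pvGetP Q (j' % b)).2)])
    else R

def minkowski (P : List (Int × Int)) (Q : List (Int × Int)) : List (Int × Int) :=
  let p := pvArgmin P
  let q := pvArgmin Q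
  let a := P.length
  let b := Q.length
  minkLoopA P Q p q a b (a + b) p q
    [((pvGetP P p).1 + (pvGetP Q q).1, (pvGetP P p).2 + (pvGetP Q q).2)]

-- ===== PORT B =====
-- rotate so the lexicographically smallest vertex comes first (Source B: rot = V[k:] + V[:k])
def pvRot (V : List (Int × Int)) : List (Int × Int) :=
  let k := pvArgmin V
  V.drop k ++ V.take k

-- edge vectors of the rotated polygon (Source B's comprehension over range(n), including the wrap-around edge)
def pvEdges (rot : List (Int × Int)) : List (Int × Int) :=
  (List.range rot.length).map (fun t =>
    ((pvGetP rot ((t + 1) % rot.length)).1 - (pvGetP rot t).1,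
     (pvGetP rot ((t + 1) % rot.length)).2 - (pvGetP rot t).2))

-- Source B's inner while/if for one P edge e: Python's cursor j into EQ is represented by the
-- remaining suffix of EQ; returns (steps emitted while handling e, remaining Q edges)
def pvFuse1 (e : Int × Int) : List (Int × Int) → List (Int × Int) × List (Int × Int)
  | [] => ([e], [])
  | f :: F =>
    let c : Int := e.1 * f.2 - e.2 * f.1
    if c < 0 then
      let sr := pvFuse1 e F
      (f :: sr.1, sr.2)
    else if c = 0 then ([(e.1 + f.1, e.2 + f.2)], F)
    else ([e], f :: F)

-- Source B's outer for-loop over EP; the trailing `steps += EQ[j:]` is the base case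
def pvFuseGo : List (Int × Int) → List (Int × Int) → List (Int × Int)
  | [], EQ => EQ
  | e :: EP, EQ =>
    let sr := pvFuse1 e EQ
    sr.1 ++ pvFuseGo EP sr.2

-- Source B's final loop: successive points visited from cur along the step vectors (out[-1] + d)
def pvWalk (cur : Int × Int) : List (Int × Int) → List (Int × Int)
  | [] => []
  | d :: ds => (cur.1 + d.1, cur.2 + d.2) :: pvWalk (cur.1 + d.1, cur.2 + d.2) ds

def minkowski_alt (P : List (Int × Int)) (Q : List (Int × Int)) : List (Int × Int) :=
  let RP := pvRot P
  let RQ := pvRot Q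
  let start := ((pvGetP RP 0).1 + (pvGetP RQ 0).1, (pvGetP RP 0).2 + (pvGetP RQ 0).2)
  start :: pvWalk start (pvFuseGo (pvEdges RP) (pvEdges RQ))

-- ===== PRECONDITION & SPEC =====
-- Pre_ excludes exactly the inputs on which Python A raises: an empty P or Q makes min() raise ValueError.
def Pre_minkowski (P : List (Int × Int)) (Q : List (Int × Int)) : Prop := P ≠ [] ∧ Q ≠ []
instance (P : List (Int × Int)) (Q : List (Int × Int)) : Decidable (Pre_minkowski P Q) := by unfold Pre_minkowski; infer_instance
def pvWitness_minkowski : (List (Int × Int)) × (List (Int × Int)) :=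
  ([(0, 0), (1, 0), (0, 1)], [(0, 0), (1, 1)])

def Spec_minkowski (P : List (Int × Int)) (Q : List (Int × Int)) (out : List (Int × Int)) : Prop := out = minkowski_alt P Q
instance (P : List (Int × Int)) (Q : List (Int × Int)) (out : List (Int × Int)) : Decidable (Spec_minkowski P Q out) := by unfold Spec_minkowski; infer_instance

-- ===== CLAIM (what is proved, stated in full; the proofs are below) =====
def Claim_equal_minkowski : Prop := ∀ (P : List (Int × Int)) (Q : List (Int × Int)), Dom_minkowski P Q → Pre_minkowski P Q → Spec_minkowski P Q (minkowski P Q)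

-- ===== LEMMAS AND PROOFS =====

-- proof-only intermediary: the symmetric head-to-head merge of the two edge lists;
-- A's loop is related to it below, and B's staged fuse is proved equal to it
def pvMergeE : List (Int × Int) → List (Int × Int) → List (Int × Int)
  | [], F => F
  | E, [] => E
  | e :: E', f :: F' =>
    let c : Int := e.1 * f.2 - e.2 * f.1
    if c > 0 then e :: pvMergeE E' (f :: F')
    else if c < 0 then f :: pvMergeE (e :: E') F'
    else (e.1 + f.1, e.2 + f.2) :: pvMergeE E' F'

theorem mergeE_nil_right (E : List (Int × Int)) : pvMergeE E [] = E := by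
  cases E <;> simp [pvMergeE]

theorem fuse1_merge (e : Int × Int) (EP : List (Int × Int))
    (ih : ∀ F, pvFuseGo EP F = pvMergeE EP F) :
    ∀ EQ, (pvFuse1 e EQ).1 ++ pvFuseGo EP (pvFuse1 e EQ).2 = pvMergeE (e :: EP) EQ := by
  intro EQ
  induction EQ with
  | nil => simp [pvFuse1, ih, mergeE_nil_right]
  | cons f F ihQ =>
    simp only [pvFuse1, pvMergeE]
    rcases lt_trichotomy (e.1 * f.2 - e.2 * f.1) 0 with hc | hc | hc
    · rw [if_pos hc, if_neg (by omega), if_pos hc]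
      simpa using ihQ
    · rw [if_neg (by omega), if_pos hc, if_neg (by omega), if_neg (by omega)]
      simp [ih]
    · rw [if_neg (by omega), if_neg (by omega), if_pos hc]
      simp [ih]

theorem fuseGo_eq_merge : ∀ (EP EQ : List (Int × Int)), pvFuseGo EP EQ = pvMergeE EP EQ := by
  intro EP
  induction EP with
  | nil => intro EQ; cases EQ <;> simp [pvFuseGo, pvMergeE]
  | cons e EP ih =>
    intro EQ
    simpa [pvFuseGo] using fuse1_merge e EP ih EQ

theorem pvArgminGo_lt (xs : List (Int × Int)) : ∀ (best : Int × Int) (bidx k : Nat),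
    bidx < k → pvArgminGo xs best bidx k < k + xs.length := by
  induction xs with
  | nil => intro best bidx k h; simpa [pvArgminGo] using h
  | cons v t ih =>
    intro best bidx k h
    simp only [pvArgminGo]
    by_cases hc : pvLexLt v best
    · simp only [hc, if_true]
      have := ih v k (k + 1) (Nat.lt_succ_self k)
      simpa [List.length_cons] using Nat.lt_of_lt_of_le this (by omega)
    · simp only [hc]
      have := ih best bidx (k + 1) (by omega)
      simpa [List.length_cons] using Nat.lt_of_lt_of_le this (by omega)

theorem pvArgmin_lt (xs : List (Int × Int)) (h : xs ≠ []) : pvArgmin xs < xs.length := by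
  cases xs with
  | nil => exact absurd rfl h
  | cons v t =>
    simpa [pvArgmin, List.length_cons, Nat.add_comm] using pvArgminGo_lt t v 0 1 (by omega)

theorem rot_length (P : List (Int × Int)) : (pvRot P).length = P.length := by
  simp [pvRot]; omega

theorem rot_get (P : List (Int × Int)) (hP : P ≠ []) (t : Nat) (ht : t < P.length) :
    pvGetP (pvRot P) t = pvGetP P ((pvArgmin P + t) % P.length) := by
  have hp := pvArgmin_lt P hP
  set p := pvArgmin P with hpdef
  set a := P.length with hadef
  have hmod : (p + t) % a < a := Nat.mod_lt _ (by omega)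
  simp only [pvGetP, pvRot, List.getD_eq_getElem?_getD]
  by_cases hlt : t < a - p
  · rw [List.getElem?_append_left (by simpa using by omega)]
    rw [List.getElem?_drop]
    have : (p + t) % a = p + t := Nat.mod_eq_of_lt (by omega)
    rw [this]
  · have hge : (P.drop p).length ≤ t := by simp; omega
    rw [List.getElem?_append_right hge]
    have hlen : (P.drop p).length = a - p := by simp [hadef]
    rw [hlen]
    have hcond : t - (a - p) < p := by omega
    rw [List.getElem?_take_of_lt hcond]
    have : (p + t) % a = t - (a - p) := by
      have h1 : p + t = a + (t - (a - p)) := by omega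
      rw [h1, Nat.add_mod_left, Nat.mod_eq_of_lt (by omega)]
    rw [this]

theorem edges_length (rot : List (Int × Int)) : (pvEdges rot).length = rot.length := by
  simp [pvEdges]

theorem edges_get (P : List (Int × Int)) (hP : P ≠ []) (t : Nat) (ht : t < P.length) :
    pvGetP (pvEdges (pvRot P)) t =
      ((pvGetP P ((pvArgmin P + t + 1) % P.length)).1 - (pvGetP P ((pvArgmin P + t) % P.length)).1,
       (pvGetP P ((pvArgmin P + t + 1) % P.length)).2 - (pvGetP P ((pvArgmin P + t) % P.length)).2) := by
  have hp := pvArgmin_lt P hP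
  have ha : 0 < P.length := by cases P <;> simp_all
  have hrl : (pvRot P).length = P.length := rot_length P
  have hget : pvGetP (pvEdges (pvRot P)) t =
      ((pvGetP (pvRot P) ((t + 1) % P.length)).1 - (pvGetP (pvRot P) t).1,
       (pvGetP (pvRot P) ((t + 1) % P.length)).2 - (pvGetP (pvRot P) t).2) := by
    simp only [pvGetP, pvEdges, List.getD_eq_getElem?_getD, hrl]
    rw [List.getElem?_map, List.getElem?_range ht]
    rfl
  rw [hget, rot_get P hP t ht, rot_get P hP ((t + 1) % P.length) (Nat.mod_lt _ ha)]
  have : (pvArgmin P + (t + 1) % P.length) % P.length = (pvArgmin P + t + 1) % P.length := by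
    rw [Nat.add_mod, Nat.mod_mod_of_dvd _ (dvd_refl _), ← Nat.add_mod, Nat.add_assoc]
  rw [this]

theorem loop_walk (P Q : List (Int × Int)) (hP : P ≠ []) (hQ : Q ≠ []) :
    ∀ (fuel i j : Nat) (R : List (Int × Int)),
      pvArgmin P ≤ i → i ≤ pvArgmin P + P.length →
      pvArgmin Q ≤ j → j ≤ pvArgmin Q + Q.length →
      (pvArgmin P + P.length - i) + (pvArgmin Q + Q.length - j) ≤ fuel →
      minkLoopA P Q (pvArgmin P) (pvArgmin Q) P.length Q.length fuel i j R =
        R ++ pvWalk ((pvGetP P (i % P.length)).1 + (pvGetP Q (j % Q.length)).1,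
                     (pvGetP P (i % P.length)).2 + (pvGetP Q (j % Q.length)).2)
          (pvMergeE ((pvEdges (pvRot P)).drop (i - pvArgmin P))
                    ((pvEdges (pvRot Q)).drop (j - pvArgmin Q))) := by
  have ha : 0 < P.length := by cases P <;> simp_all
  have hb : 0 < Q.length := by cases Q <;> simp_all
  have hEPlen : (pvEdges (pvRot P)).length = P.length := by rw [edges_length, rot_length]
  have hEQlen : (pvEdges (pvRot Q)).length = Q.length := by rw [edges_length, rot_length]
  intro fuel
  induction fuel with
  | zero =>
    intro i j R hi1 hi2 hj1 hj2 hfuel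
    have hdP : (pvEdges (pvRot P)).drop (i - pvArgmin P) = [] :=
      List.drop_eq_nil_of_le (by omega)
    have hdQ : (pvEdges (pvRot Q)).drop (j - pvArgmin Q) = [] :=
      List.drop_eq_nil_of_le (by omega)
    rw [hdP, hdQ]
    simp [minkLoopA, pvMergeE, pvWalk]
  | succ fuel ih =>
    intro i j R hi1 hi2 hj1 hj2 hfuel
    by_cases hi : i = pvArgmin P + P.length
    · by_cases hj : j = pvArgmin Q + Q.length
      · have hdP : (pvEdges (pvRot P)).drop (i - pvArgmin P) = [] :=
          List.drop_eq_nil_of_le (by omega)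
        have hdQ : (pvEdges (pvRot Q)).drop (j - pvArgmin Q) = [] :=
          List.drop_eq_nil_of_le (by omega)
        rw [hdP, hdQ]
        simp only [minkLoopA]
        rw [if_neg (by omega)]
        simp [pvMergeE, pvWalk]
      · -- P exhausted: A steps j, B walks the next Q edge
        have htQ : j - pvArgmin Q < (pvEdges (pvRot Q)).length := by omega
        have hdP : (pvEdges (pvRot P)).drop (i - pvArgmin P) = [] :=
          List.drop_eq_nil_of_le (by omega)
        have hdQ : (pvEdges (pvRot Q)).drop (j - pvArgmin Q) =
            (pvEdges (pvRot Q))[j - pvArgmin Q] :: (pvEdges (pvRot Q)).drop (j - pvArgmin Q + 1) :=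
          List.drop_eq_getElem_cons htQ
        have hgQ : (pvEdges (pvRot Q))[j - pvArgmin Q] = pvGetP (pvEdges (pvRot Q)) (j - pvArgmin Q) :=
          (List.getD_eq_getElem _ _ htQ).symm
        have heQ := edges_get Q hQ (j - pvArgmin Q) (by omega)
        rw [show pvArgmin Q + (j - pvArgmin Q) = j from by omega] at heQ
        have heQ1 : (pvGetP (pvEdges (pvRot Q)) (j - pvArgmin Q)).1 =
            (pvGetP Q ((j + 1) % Q.length)).1 - (pvGetP Q (j % Q.length)).1 := by rw [heQ]
        have heQ2 : (pvGetP (pvEdges (pvRot Q)) (j - pvArgmin Q)).2 =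
            (pvGetP Q ((j + 1) % Q.length)).2 - (pvGetP Q (j % Q.length)).2 := by rw [heQ]
        simp only [minkLoopA]
        rw [if_pos (by omega), if_pos hi]
        rw [ih i (j + 1) _ hi1 hi2 (by omega) (by omega) (by omega)]
        rw [show j + 1 - pvArgmin Q = j - pvArgmin Q + 1 from by omega, hdP]
        rw [hdQ, hgQ]
        simp only [pvMergeE, pvWalk]
        have hx : ((pvGetP P (i % P.length)).1 + (pvGetP Q (j % Q.length)).1 +
              (pvGetP (pvEdges (pvRot Q)) (j - pvArgmin Q)).1,
            (pvGetP P (i % P.length)).2 + (pvGetP Q (j % Q.length)).2 +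
              (pvGetP (pvEdges (pvRot Q)) (j - pvArgmin Q)).2) =
            ((pvGetP P (i % P.length)).1 + (pvGetP Q ((j + 1) % Q.length)).1,
             (pvGetP P (i % P.length)).2 + (pvGetP Q ((j + 1) % Q.length)).2) := by
          rw [heQ1, heQ2]
          simp only [Prod.mk.injEq]
          exact ⟨by ring, by ring⟩
        rw [hx]; simp
    · by_cases hj : j = pvArgmin Q + Q.length
      · -- Q exhausted: A steps i, B walks the next P edge
        have htP : i - pvArgmin P < (pvEdges (pvRot P)).length := by omega
        have hdQ : (pvEdges (pvRot Q)).drop (j - pvArgmin Q) = [] :=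
          List.drop_eq_nil_of_le (by omega)
        have hdP : (pvEdges (pvRot P)).drop (i - pvArgmin P) =
            (pvEdges (pvRot P))[i - pvArgmin P] :: (pvEdges (pvRot P)).drop (i - pvArgmin P + 1) :=
          List.drop_eq_getElem_cons htP
        have hgP : (pvEdges (pvRot P))[i - pvArgmin P] = pvGetP (pvEdges (pvRot P)) (i - pvArgmin P) :=
          (List.getD_eq_getElem _ _ htP).symm
        have heP := edges_get P hP (i - pvArgmin P) (by omega)
        rw [show pvArgmin P + (i - pvArgmin P) = i from by omega] at heP
        have heP1 : (pvGetP (pvEdges (pvRot P)) (i - pvArgmin P)).1 =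
            (pvGetP P ((i + 1) % P.length)).1 - (pvGetP P (i % P.length)).1 := by rw [heP]
        have heP2 : (pvGetP (pvEdges (pvRot P)) (i - pvArgmin P)).2 =
            (pvGetP P ((i + 1) % P.length)).2 - (pvGetP P (i % P.length)).2 := by rw [heP]
        simp only [minkLoopA]
        rw [if_pos (by omega), if_neg hi, if_pos hj]
        rw [ih (i + 1) j _ (by omega) (by omega) hj1 hj2 (by omega)]
        rw [show i + 1 - pvArgmin P = i - pvArgmin P + 1 from by omega, hdQ]
        rw [hdP, hgP]
        simp only [pvMergeE, pvWalk]
        have hx : ((pvGetP P (i % P.length)).1 + (pvGetP Q (j % Q.length)).1 +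
              (pvGetP (pvEdges (pvRot P)) (i - pvArgmin P)).1,
            (pvGetP P (i % P.length)).2 + (pvGetP Q (j % Q.length)).2 +
              (pvGetP (pvEdges (pvRot P)) (i - pvArgmin P)).2) =
            ((pvGetP P ((i + 1) % P.length)).1 + (pvGetP Q (j % Q.length)).1,
             (pvGetP P ((i + 1) % P.length)).2 + (pvGetP Q (j % Q.length)).2) := by
          rw [heP1, heP2]
          simp only [Prod.mk.injEq]
          exact ⟨by ring, by ring⟩
        rw [hx]; simp [mergeE_nil_right]
      · -- interior: compare the two current edges
        have htP : i - pvArgmin P < (pvEdges (pvRot P)).length := by omega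
        have htQ : j - pvArgmin Q < (pvEdges (pvRot Q)).length := by omega
        have hdP : (pvEdges (pvRot P)).drop (i - pvArgmin P) =
            (pvEdges (pvRot P))[i - pvArgmin P] :: (pvEdges (pvRot P)).drop (i - pvArgmin P + 1) :=
          List.drop_eq_getElem_cons htP
        have hdQ : (pvEdges (pvRot Q)).drop (j - pvArgmin Q) =
            (pvEdges (pvRot Q))[j - pvArgmin Q] :: (pvEdges (pvRot Q)).drop (j - pvArgmin Q + 1) :=
          List.drop_eq_getElem_cons htQ
        have hgP : (pvEdges (pvRot P))[i - pvArgmin P] = pvGetP (pvEdges (pvRot P)) (i - pvArgmin P) :=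
          (List.getD_eq_getElem _ _ htP).symm
        have hgQ : (pvEdges (pvRot Q))[j - pvArgmin Q] = pvGetP (pvEdges (pvRot Q)) (j - pvArgmin Q) :=
          (List.getD_eq_getElem _ _ htQ).symm
        have heP := edges_get P hP (i - pvArgmin P) (by omega)
        rw [show pvArgmin P + (i - pvArgmin P) = i from by omega] at heP
        have heQ := edges_get Q hQ (j - pvArgmin Q) (by omega)
        rw [show pvArgmin Q + (j - pvArgmin Q) = j from by omega] at heQ
        have heP1 : (pvGetP (pvEdges (pvRot P)) (i - pvArgmin P)).1 =
            (pvGetP P ((i + 1) % P.length)).1 - (pvGetP P (i % P.length)).1 := by rw [heP]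
        have heP2 : (pvGetP (pvEdges (pvRot P)) (i - pvArgmin P)).2 =
            (pvGetP P ((i + 1) % P.length)).2 - (pvGetP P (i % P.length)).2 := by rw [heP]
        have heQ1 : (pvGetP (pvEdges (pvRot Q)) (j - pvArgmin Q)).1 =
            (pvGetP Q ((j + 1) % Q.length)).1 - (pvGetP Q (j % Q.length)).1 := by rw [heQ]
        have heQ2 : (pvGetP (pvEdges (pvRot Q)) (j - pvArgmin Q)).2 =
            (pvGetP Q ((j + 1) % Q.length)).2 - (pvGetP Q (j % Q.length)).2 := by rw [heQ]
        set cA : Int :=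
          ((pvGetP P ((i + 1) % P.length)).1 - (pvGetP P (i % P.length)).1) *
            ((pvGetP Q ((j + 1) % Q.length)).2 - (pvGetP Q (j % Q.length)).2) -
          ((pvGetP P ((i + 1) % P.length)).2 - (pvGetP P (i % P.length)).2) *
            ((pvGetP Q ((j + 1) % Q.length)).1 - (pvGetP Q (j % Q.length)).1) with hcA
        have hcB : (pvGetP (pvEdges (pvRot P)) (i - pvArgmin P)).1 *
              (pvGetP (pvEdges (pvRot Q)) (j - pvArgmin Q)).2 -
            (pvGetP (pvEdges (pvRot P)) (i - pvArgmin P)).2 *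
              (pvGetP (pvEdges (pvRot Q)) (j - pvArgmin Q)).1 = cA := by
          rw [heP1, heP2, heQ1, heQ2]
        simp only [minkLoopA]
        rw [if_pos (by omega), if_neg hi, if_neg hj]
        rw [hdP, hdQ, hgP, hgQ]
        simp only [pvMergeE]
        rw [hcB]
        rcases lt_trichotomy cA 0 with hc | hc | hc
        · -- c < 0 : A advances j only; B takes the Q edge
          rw [if_neg (by omega), if_pos (by omega), if_neg (by omega), if_pos hc]
          rw [ih i (j + 1) _ hi1 hi2 (by omega) (by omega) (by omega)]
          rw [show j + 1 - pvArgmin Q = j - pvArgmin Q + 1 from by omega]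
          rw [hdP, hgP]
          simp only [pvWalk]
          have hx : ((pvGetP P (i % P.length)).1 + (pvGetP Q (j % Q.length)).1 +
                (pvGetP (pvEdges (pvRot Q)) (j - pvArgmin Q)).1,
              (pvGetP P (i % P.length)).2 + (pvGetP Q (j % Q.length)).2 +
                (pvGetP (pvEdges (pvRot Q)) (j - pvArgmin Q)).2) =
              ((pvGetP P (i % P.length)).1 + (pvGetP Q ((j + 1) % Q.length)).1,
               (pvGetP P (i % P.length)).2 + (pvGetP Q ((j + 1) % Q.length)).2) := by
            rw [heQ1, heQ2]
            simp only [Prod.mk.injEq]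
            exact ⟨by ring, by ring⟩
          rw [hx]; simp
        · -- c = 0 : A advances both; B takes the summed edge
          rw [if_pos (by omega), if_pos (by omega), if_neg (by omega), if_neg (by omega)]
          rw [ih (i + 1) (j + 1) _ (by omega) (by omega) (by omega) (by omega) (by omega)]
          rw [show i + 1 - pvArgmin P = i - pvArgmin P + 1 from by omega,
              show j + 1 - pvArgmin Q = j - pvArgmin Q + 1 from by omega]
          simp only [pvWalk]
          have hx : ((pvGetP P (i % P.length)).1 + (pvGetP Q (j % Q.length)).1 +
                ((pvGetP (pvEdges (pvRot P)) (i - pvArgmin P)).1 +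
                 (pvGetP (pvEdges (pvRot Q)) (j - pvArgmin Q)).1),
              (pvGetP P (i % P.length)).2 + (pvGetP Q (j % Q.length)).2 +
                ((pvGetP (pvEdges (pvRot P)) (i - pvArgmin P)).2 +
                 (pvGetP (pvEdges (pvRot Q)) (j - pvArgmin Q)).2)) =
              ((pvGetP P ((i + 1) % P.length)).1 + (pvGetP Q ((j + 1) % Q.length)).1,
               (pvGetP P ((i + 1) % P.length)).2 + (pvGetP Q ((j + 1) % Q.length)).2) := by
            rw [heP1, heP2, heQ1, heQ2]
            simp only [Prod.mk.injEq]
            exact ⟨by ring, by ring⟩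
          rw [hx]; simp
        · -- c > 0 : A advances i only; B takes the P edge
          rw [if_pos (by omega), if_neg (by omega), if_pos hc]
          rw [ih (i + 1) j _ (by omega) (by omega) hj1 hj2 (by omega)]
          rw [show i + 1 - pvArgmin P = i - pvArgmin P + 1 from by omega]
          rw [hdQ, hgQ]
          simp only [pvWalk]
          have hx : ((pvGetP P (i % P.length)).1 + (pvGetP Q (j % Q.length)).1 +
                (pvGetP (pvEdges (pvRot P)) (i - pvArgmin P)).1,
              (pvGetP P (i % P.length)).2 + (pvGetP Q (j % Q.length)).2 +
                (pvGetP (pvEdges (pvRot P)) (i - pvArgmin P)).2) =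
              ((pvGetP P ((i + 1) % P.length)).1 + (pvGetP Q (j % Q.length)).1,
               (pvGetP P ((i + 1) % P.length)).2 + (pvGetP Q (j % Q.length)).2) := by
            rw [heP1, heP2]
            simp only [Prod.mk.injEq]
            exact ⟨by ring, by ring⟩
          rw [hx]; simp
theorem minkowski_eq_alt (P Q : List (Int × Int)) (hP : P ≠ []) (hQ : Q ≠ []) :
    minkowski P Q = minkowski_alt P Q := by
  have ha : 0 < P.length := by cases P <;> simp_all
  have hb : 0 < Q.length := by cases Q <;> simp_all
  have hpa : pvArgmin P % P.length = pvArgmin P := Nat.mod_eq_of_lt (pvArgmin_lt P hP)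
  have hqb : pvArgmin Q % Q.length = pvArgmin Q := Nat.mod_eq_of_lt (pvArgmin_lt Q hQ)
  have hr0P : pvGetP (pvRot P) 0 = pvGetP P (pvArgmin P) := by
    rw [rot_get P hP 0 ha]
    simp [hpa]
  have hr0Q : pvGetP (pvRot Q) 0 = pvGetP Q (pvArgmin Q) := by
    rw [rot_get Q hQ 0 hb]
    simp [hqb]
  simp only [minkowski, minkowski_alt]
  rw [fuseGo_eq_merge]
  rw [loop_walk P Q hP hQ (P.length + Q.length) (pvArgmin P) (pvArgmin Q) _
      (le_refl _) (by omega) (le_refl _) (by omega) (by omega)]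
  rw [hpa, hqb, Nat.sub_self, Nat.sub_self, List.drop_zero, List.drop_zero,
      hr0P, hr0Q, List.singleton_append]

-- ===== VERDICT (by name: the statement is the Claim_ definition above) =====
theorem minkowski_spec : Claim_equal_minkowski := by
  intro P Q _ hpre
  unfold Spec_minkowski
  exact minkowski_eq_alt P Q hpre.1 hpre.2
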